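-- pv_equiv track=rewrite | github.com/neko3141592/AROS | research_agent/tools/evaluator_helpers.py | _build_line_ranges_from_indexes
-- ===== SOURCE A (Python) =====
-- def _build_line_ranges_from_indexes(
--     indexes: list[int],
--     total_lines: int,
--     context_lines: int,
-- ) -> list[tuple[int, int]]:
--     """
--     注目行インデックスから前後文脈を含む行レンジへ変換する。
--     """
--     if not indexes or total_lines <= 0:
--         return []
--
--     ranges: list[tuple[int, int]] = []
--     for idx in sorted(set(indexes)):
--         start = max(0, idx - context_lines)
--         end = min(total_lines - 1, idx + context_lines)
--         if ranges and start <= ranges[-1][1] + 1: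
--             ranges[-1] = (ranges[-1][0], max(ranges[-1][1], end))
--         else:
--             ranges.append((start, end))
--     return ranges
-- ===== SOURCE B (Python) =====
-- def _build_line_ranges_from_indexes(
--     indexes: list[int],
--     total_lines: int,
--     context_lines: int,
-- ) -> list[tuple[int, int]]:
--     if not indexes or total_lines <= 0:
--         return []
--     xs = sorted(set(indexes))
--     # stage 1: adjacency flags — a window starts a new group iff it does not
--     # touch or overlap its left neighbour's window
--     breaks = [True] + [max(0, j - context_lines) > min(total_lines - 1, i + context_lines) + 1
--                        for i, j in zip(xs, xs[1:])]
--     # stage 2: partition the sorted unique indexes into runs at the break points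
--     groups: list[list[int]] = []
--     for x, brk in zip(xs, breaks):
--         if brk:
--             groups.append([x])
--         else:
--             groups[-1].append(x)
--     # stage 3: each run becomes (clipped start of first, clipped end of last)
--     return [(max(0, g[0] - context_lines), min(total_lines - 1, g[-1] + context_lines))
--             for g in groups]
-- ===== Notes on version B (the rewrite author's own statement) =====
-- stated objective: alternative
-- what changed: B replaces A's accumulator merge (rewriting ranges[-1] with a running max) by three staged passes: precompute adjacency break flags by zipping the sorted unique indexes with their right neighbours, partition the indexes into runs at the breaks, then map each run to (clip(first-ctx), clip(last+ctx)); equal because the clipped window ends are monotone in the index, so A's running max is always the last element's end.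
import Mathlib
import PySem

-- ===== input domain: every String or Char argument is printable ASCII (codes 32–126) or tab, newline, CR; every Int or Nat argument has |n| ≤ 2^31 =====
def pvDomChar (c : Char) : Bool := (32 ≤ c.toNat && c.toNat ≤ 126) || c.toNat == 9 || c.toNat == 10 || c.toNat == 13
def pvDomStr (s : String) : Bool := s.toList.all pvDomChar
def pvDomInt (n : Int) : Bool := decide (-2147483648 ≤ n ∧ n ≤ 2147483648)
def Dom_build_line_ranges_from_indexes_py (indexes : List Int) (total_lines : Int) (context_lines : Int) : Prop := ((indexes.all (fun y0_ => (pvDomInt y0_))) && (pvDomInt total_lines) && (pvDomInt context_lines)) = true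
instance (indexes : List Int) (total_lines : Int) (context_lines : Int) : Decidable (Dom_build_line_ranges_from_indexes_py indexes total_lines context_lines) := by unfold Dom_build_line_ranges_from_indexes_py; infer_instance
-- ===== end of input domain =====

-- B replaces A's accumulator merge by three staged passes (break flags via zip with the
-- right neighbour, partition into runs, map each run to a clipped range): alternative
-- decomposition, same cost.

-- ===== PORT A =====
-- loop body of A: ranges[-1] via getLast?, mutation of ranges[-1] via dropLast ++ [·]
def pvMergeA (ranges : List (Int × Int)) (p : Int × Int) : List (Int × Int) :=
  match ranges.getLast? with
  | some (ls, le) => if p.1 ≤ le + 1 then ranges.dropLast ++ [(ls, max le p.2)] else ranges ++ [p]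
  | none => ranges ++ [p]

def build_line_ranges_from_indexes_py (indexes : List Int) (total_lines : Int) (context_lines : Int) : List (Int × Int) :=
  if indexes = [] ∨ total_lines ≤ 0 then []
  else
    (PySem.List.sorted (PySem.Set.ofList indexes) (fun x => x) false).foldl
      (fun ranges idx =>
        pvMergeA ranges (max 0 (idx - context_lines), min (total_lines - 1) (idx + context_lines))) []

-- ===== PORT B =====
def build_line_ranges_from_indexes_py_alt (indexes : List Int) (total_lines : Int) (context_lines : Int) : List (Int × Int) :=
  if indexes = [] ∨ total_lines ≤ 0 then []
  else
    let xs := PySem.List.sorted (PySem.Set.ofList indexes) (fun x => x) false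
    -- breaks = [True] + [lo(j) > hi(i) + 1 for i, j in zip(xs, xs[1:])]
    let breaks := true :: (xs.zip (xs.drop 1)).map (fun ij =>
        decide (max 0 (ij.2 - context_lines) > min (total_lines - 1) (ij.1 + context_lines) + 1))
    -- for x, brk in zip(xs, breaks): append [x] or mutate groups[-1] (dropLast ++ [·])
    let groups := (xs.zip breaks).foldl (fun groups xb =>
        if xb.2 then groups ++ [[xb.1]]
        else groups.dropLast ++ [(groups.getLast?.getD []) ++ [xb.1]]) ([] : List (List Int))
    -- g[0] / g[-1]: every group is nonempty by construction, so headD/getLastD are exact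
    groups.map (fun g =>
      (max 0 (g.headD 0 - context_lines), min (total_lines - 1) (g.getLastD 0 + context_lines)))

-- ===== PRECONDITION & SPEC =====
def Spec_build_line_ranges_from_indexes_py (indexes : List Int) (total_lines : Int) (context_lines : Int) (out : List (Int × Int)) : Prop := out = build_line_ranges_from_indexes_py_alt indexes total_lines context_lines
instance (indexes : List Int) (total_lines : Int) (context_lines : Int) (out : List (Int × Int)) : Decidable (Spec_build_line_ranges_from_indexes_py indexes total_lines context_lines out) := by unfold Spec_build_line_ranges_from_indexes_py; infer_instance

-- ===== CLAIM (what is proved, stated in full; the proofs are below) =====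
def Claim_equal_build_line_ranges_from_indexes_py : Prop := ∀ (indexes : List Int) (total_lines : Int) (context_lines : Int), Dom_build_line_ranges_from_indexes_py indexes total_lines context_lines → Spec_build_line_ranges_from_indexes_py indexes total_lines context_lines (build_line_ranges_from_indexes_py indexes total_lines context_lines)

-- ===== LEMMAS AND PROOFS =====

-- window bounds, abbreviations for the proofs
def pvLo (cl idx : Int) : Int := max 0 (idx - cl)
def pvHi (tl cl idx : Int) : Int := min (tl - 1) (idx + cl)

-- reference for A: merge a chain of intervals, carrying the current (open) group q
def pvRuns (q : Int × Int) : List (Int × Int) → List (Int × Int)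
  | [] => [q]
  | p :: ys => if p.1 ≤ q.2 + 1 then pvRuns (q.1, max q.2 p.2) ys else q :: pvRuns p ys

-- A's fold equals pvRuns (acc is the already-closed part, q the open last range)
theorem pvFoldA_runs (ys : List (Int × Int)) : ∀ acc q,
    List.foldl pvMergeA (acc ++ [q]) ys = acc ++ pvRuns q ys := by
  induction ys with
  | nil => intro acc q; simp [pvRuns]
  | cons p ys ih =>
    intro acc q
    by_cases h : p.1 ≤ q.2 + 1
    · have : pvMergeA (acc ++ [q]) p = acc ++ [(q.1, max q.2 p.2)] := by
        simp [pvMergeA, h]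
      rw [List.foldl_cons, this, ih acc (q.1, max q.2 p.2)]
      simp [pvRuns, h]
    · have : pvMergeA (acc ++ [q]) p = (acc ++ [q]) ++ [p] := by
        simp [pvMergeA, h]
      rw [List.foldl_cons, this, ih (acc ++ [q]) p]
      simp [pvRuns, h]

-- reference for B: partition into runs, carrying the open group g whose last element is prev
def pvRunsG (tl cl : Int) (g : List Int) (prev : Int) : List Int → List (List Int)
  | [] => [g]
  | x :: xs =>
    if pvLo cl x ≤ pvHi tl cl prev + 1 then pvRunsG tl cl (g ++ [x]) x xs
    else g :: pvRunsG tl cl [x] x xs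

-- B's grouping fold equals pvRunsG
theorem pvFoldB_runsG (tl cl : Int) (xt : List Int) : ∀ (prev : Int) (g : List Int) (acc : List (List Int)),
    List.foldl (fun groups xb =>
        if xb.2 then groups ++ [[xb.1]]
        else groups.dropLast ++ [(groups.getLast?.getD []) ++ [xb.1]])
      (acc ++ [g])
      (xt.zip (((prev :: xt).zip xt).map (fun ij =>
        decide (max 0 (ij.2 - cl) > min (tl - 1) (ij.1 + cl) + 1))))
    = acc ++ pvRunsG tl cl g prev xt := by
  induction xt with
  | nil => intro prev g acc; simp [pvRunsG]
  | cons x xt ih =>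
    intro prev g acc
    by_cases h : pvLo cl x ≤ pvHi tl cl prev + 1
    · have hb : ¬ (max 0 (x - cl) > min (tl - 1) (prev + cl) + 1) := by
        simp [pvLo, pvHi] at h; omega
      simp only [List.zip_cons_cons, List.map_cons, List.foldl_cons, decide_eq_true_eq]
      rw [if_neg (by simpa using hb)]
      have : (acc ++ [g]).dropLast ++ [((acc ++ [g]).getLast?.getD []) ++ [x]]
          = acc ++ [g ++ [x]] := by simp
      rw [this, ih x (g ++ [x]) acc]
      simp [pvRunsG, h]
    · have hb : max 0 (x - cl) > min (tl - 1) (prev + cl) + 1 := by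
        simp [pvLo, pvHi] at h; omega
      simp only [List.zip_cons_cons, List.map_cons, List.foldl_cons, decide_eq_true_eq]
      rw [if_pos (by simpa using hb)]
      rw [ih x [x] (acc ++ [g])]
      simp [pvRunsG, h]

-- mapping each run to its clipped range equals pvRuns, on a strictly increasing tail
theorem pvRunsG_map (tl cl : Int) (xt : List Int) : ∀ (prev h : Int) (g : List Int),
    g ≠ [] → g.headD 0 = h → g.getLastD 0 = prev →
    (prev :: xt).Pairwise (· < ·) →
    (pvRunsG tl cl g prev xt).map (fun g =>
        (max 0 (g.headD 0 - cl), min (tl - 1) (g.getLastD 0 + cl)))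
      = pvRuns (pvLo cl h, pvHi tl cl prev)
          (xt.map (fun idx => (pvLo cl idx, pvHi tl cl idx))) := by
  induction xt with
  | nil =>
    intro prev h g _ hh hl _
    simp only [pvRunsG, pvRuns, List.map_cons, List.map_nil]
    rw [hh, hl]
    simp [pvLo, pvHi]
  | cons x xt ih =>
    intro prev h g hne hh hl hsort
    have hpx : prev < x := (List.pairwise_cons.mp hsort).1 x (by simp)
    have hsort' : (x :: xt).Pairwise (· < ·) := (List.pairwise_cons.mp hsort).2
    by_cases hc : pvLo cl x ≤ pvHi tl cl prev + 1
    · have hmax : max (pvHi tl cl prev) (pvHi tl cl x) = pvHi tl cl x := by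
        simp [pvHi]; omega
      have hgx : g ++ [x] ≠ [] := by simp
      have hh' : (g ++ [x]).headD 0 = h := by
        rcases g with _ | ⟨a, t⟩
        · exact absurd rfl hne
        · simpa using hh
      have hl' : (g ++ [x]).getLastD 0 = x := by simp
      simp only [pvRunsG, if_pos hc, List.map_cons]
      rw [ih x h (g ++ [x]) hgx hh' hl' hsort']
      simp [pvRuns, hc, hmax]
    · simp only [pvRunsG, if_neg hc, List.map_cons]
      rw [ih x x [x] (by simp) (by simp) (by simp) hsort', hh, hl]
      simp only [pvRuns, hc]
      simp [pvLo, pvHi]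

-- ===== VERDICT (by name: the statement is the Claim_ definition above) =====
theorem build_line_ranges_from_indexes_py_spec : Claim_equal_build_line_ranges_from_indexes_py := by
  intro indexes total_lines context_lines _
  unfold Spec_build_line_ranges_from_indexes_py
  unfold build_line_ranges_from_indexes_py build_line_ranges_from_indexes_py_alt
  by_cases hg : indexes = [] ∨ total_lines ≤ 0
  · simp [hg]
  · simp only [hg, if_false]
    set xs := PySem.List.sorted (PySem.Set.ofList indexes) (fun x => x) false with hxs
    have hsort : xs.Pairwise (· < ·) := PySem.List.sorted_ofList_pairwise_lt (xs := indexes)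
    rcases hxse : xs with _ | ⟨x, xt⟩
    · simp
    · rw [hxse] at hsort
      -- A side
      have hA : List.foldl (fun ranges idx => pvMergeA ranges
            (max 0 (idx - context_lines), min (total_lines - 1) (idx + context_lines))) [] (x :: xt)
          = pvRuns (pvLo context_lines x, pvHi total_lines context_lines x)
              (xt.map (fun idx => (pvLo context_lines idx, pvHi total_lines context_lines idx))) := by
        rw [show (List.foldl (fun ranges idx => pvMergeA ranges
              (max 0 (idx - context_lines), min (total_lines - 1) (idx + context_lines))) [] (x :: xt))
            = List.foldl pvMergeA [] ((x :: xt).map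
                (fun idx => (max 0 (idx - context_lines), min (total_lines - 1) (idx + context_lines)))) from
          by rw [List.foldl_map]]
        simp only [List.map_cons, List.foldl_cons]
        have h0 : pvMergeA [] (max 0 (x - context_lines), min (total_lines - 1) (x + context_lines))
            = [] ++ [(max 0 (x - context_lines), min (total_lines - 1) (x + context_lines))] := by
          simp [pvMergeA]
        rw [h0, pvFoldA_runs]
        simp [pvLo, pvHi]
      -- B side
      have hzip : (x :: xt).zip ((x :: xt).drop 1) = (x :: xt).zip xt := by simp
      have hB : List.foldl (fun groups xb =>
            if xb.2 then groups ++ [[xb.1]]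
            else groups.dropLast ++ [(groups.getLast?.getD []) ++ [xb.1]]) []
            ((x :: xt).zip (true :: ((x :: xt).zip ((x :: xt).drop 1)).map (fun ij =>
              decide (max 0 (ij.2 - context_lines) > min (total_lines - 1) (ij.1 + context_lines) + 1))))
          = pvRunsG total_lines context_lines [x] x xt := by
        rw [hzip, List.zip_cons_cons, List.foldl_cons]
        show List.foldl _ ([] ++ [[x]]) _ = _
        rw [pvFoldB_runsG total_lines context_lines xt x [x] []]
        simp
      rw [hA, hB, pvRunsG_map total_lines context_lines xt x x [x] (by simp) rfl rfl hsort]
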